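-- pv_equiv track=rewrite | github.com/fabien-208/cours | cours/L1/Algorithme 2/TD/TD 1.py | base_genre
-- ===== SOURCE A (Python) =====
-- def base_genre(base):
--     genre = {}
--     for film in base:
--         if film['genre'] not in genre:
--             genre[film['genre']] = []
--             genre[film['genre']].append(film['titre'])
--         else:
--             genre[film['genre']].append(film['titre'])
--     return genre
-- ===== SOURCE B (Python) =====
-- def base_genre(base):
--     # Two-pass grouping: distinct genres in first-occurrence order, then one
--     # comprehension per genre, instead of A's single-pass dict accumulation.
--     genres = dict.fromkeys(film['genre'] for film in base)
--     return {g: [film['titre'] for film in base if film['genre'] == g] for g in genres}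
-- ===== Notes on version B (the rewrite author's own statement) =====
-- stated objective: alternative
-- what changed: Replaced A's single-pass dict accumulation (create-or-append per film) by a two-pass decomposition: collect the distinct genres in first-occurrence order via dict.fromkeys, then build each genre's title list with one filtering comprehension over the base.
import Mathlib
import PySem

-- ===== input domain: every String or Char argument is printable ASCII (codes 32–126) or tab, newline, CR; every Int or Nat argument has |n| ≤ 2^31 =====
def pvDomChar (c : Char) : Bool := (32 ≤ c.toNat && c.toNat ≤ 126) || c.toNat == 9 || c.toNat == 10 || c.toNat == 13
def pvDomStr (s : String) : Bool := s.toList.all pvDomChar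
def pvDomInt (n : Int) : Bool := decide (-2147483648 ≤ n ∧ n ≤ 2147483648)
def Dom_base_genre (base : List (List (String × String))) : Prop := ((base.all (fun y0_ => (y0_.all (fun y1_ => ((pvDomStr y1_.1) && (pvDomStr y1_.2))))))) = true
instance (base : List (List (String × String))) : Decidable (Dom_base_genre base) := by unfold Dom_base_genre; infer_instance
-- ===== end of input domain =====

-- B groups by two passes (distinct genres in first-occurrence order, then one title-filter per genre)
-- instead of A's single-pass dict accumulation; objective: alternative decomposition, same result.


-- film['k'] : first-match lookup in the film's association list (Python dict access);
-- the .getD "" default is never reached on Pre_ (both keys present).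
def fGet (film : List (String × String)) (k : String) : String :=
  ((PySem.Dict.mk film).get? k).getD ""

-- ===== PORT A =====
def base_genre (base : List (List (String × String))) : List (String × List String) :=
  (base.foldl (fun genre film =>
      let g := fGet film "genre"
      if genre.contains g = false then
        -- genre[g] = []; genre[g].append(titre)
        (genre.insert g []).modify g [] (fun ts => ts ++ [fGet film "titre"])
      else
        -- genre[g].append(titre)
        genre.modify g [] (fun ts => ts ++ [fGet film "titre"]))
    PySem.Dict.empty).items

-- ===== PORT B =====
def base_genre_alt (base : List (List (String × String))) : List (String × List String) :=
  let genres := PySem.List.dedup (base.map (fun film => fGet film "genre"))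
  genres.map (fun g =>
    (g, (base.filter (fun film => fGet film "genre" == g)).map (fun film => fGet film "titre")))

-- ===== PRECONDITION & SPEC =====
-- Pre_ excludes films missing a 'genre' or 'titre' key, on which Python A raises KeyError.
def Pre_base_genre (base : List (List (String × String))) : Prop :=
  (base.all (fun film =>
    (PySem.Dict.mk film).contains "genre" && (PySem.Dict.mk film).contains "titre")) = true
instance (base : List (List (String × String))) : Decidable (Pre_base_genre base) := by unfold Pre_base_genre; infer_instance
def pvWitness_base_genre : (List (List (String × String))) :=
  [[("genre", "sf"), ("titre", "Dune")], [("genre", "sf"), ("titre", "Alien")], [("genre", "drame"), ("titre", "Amour")]]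

def Spec_base_genre (base : List (List (String × String))) (out : List (String × List String)) : Prop := out = base_genre_alt base
instance (base : List (List (String × String))) (out : List (String × List String)) : Decidable (Spec_base_genre base out) := by unfold Spec_base_genre; infer_instance

-- ===== CLAIM (what is proved, stated in full; the proofs are below) =====
def Claim_equal_base_genre : Prop := ∀ (base : List (List (String × String))), Dom_base_genre base → Pre_base_genre base → Spec_base_genre base (base_genre base)

-- ===== LEMMAS AND PROOFS =====

-- A's two branches are one and the same dict update: on an absent key,
-- "insert empty list, then append" is exactly "modify with default []".
theorem step_eq (d : PySem.Dict String (List String)) (g t : String) :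
    (if d.contains g = false then
        (d.insert g []).modify g [] (fun ts => ts ++ [t])
      else d.modify g [] (fun ts => ts ++ [t]))
    = d.modify g [] (fun ts => ts ++ [t]) := by
  by_cases h : d.contains g = false
  · have hany : (d.items.any fun p => p.1 == g) = false := by
      simpa [PySem.Dict.contains] using h
    have hne : ∀ p ∈ d.items, ¬ p.1 = g := by
      intro p hp
      simpa using List.any_eq_false.mp hany p hp
    have hfind : d.items.find? (fun p => p.1 == g) = none :=
      List.find?_eq_none.mpr (fun p hp => by simpa using hne p hp)
    have hmap : ∀ (v : List String),
        List.map (fun p => if p.1 = g then (g, v) else p) d.items = d.items := by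
      intro v
      rw [List.map_congr_left (fun p hp => by rw [if_neg (hne p hp)])]
      exact List.map_id' d.items
    simp [PySem.Dict.modify, PySem.Dict.insert, PySem.Dict.getD, PySem.Dict.get?,
      PySem.Dict.contains, hany, hfind, List.find?_append, List.any_append, hmap]
  · simp [h]

theorem base_genre_eq_modify_fold (base : List (List (String × String))) :
    base_genre base
      = ((base.map (fun film => (fGet film "genre", fGet film "titre"))).foldl
          (fun d p => d.modify p.1 [] (fun ts => ts ++ [p.2])) PySem.Dict.empty).items := by
  unfold base_genre
  rw [List.foldl_map]
  congr 2
  funext d film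
  exact step_eq d (fGet film "genre") (fGet film "titre")

theorem base_genre_spec_aux (base : List (List (String × String))) :
    base_genre base = base_genre_alt base := by
  rw [base_genre_eq_modify_fold]
  set pairs := base.map (fun film => (fGet film "genre", fGet film "titre")) with hpairs
  set D := pairs.foldl (fun d p => d.modify p.1 [] (fun ts => ts ++ [p.2])) PySem.Dict.empty with hD
  have hkeys : D.keys = PySem.Set.ofList (base.map (fun film => fGet film "genre")) := by
    rw [hD, PySem.Dict.keys_foldl_modify_key pairs Prod.fst [] (fun _ p => fun ts => ts ++ [p.2])]
    simp [PySem.Dict.empty, PySem.Dict.keys, PySem.Set.update_nil_left, hpairs, List.map_map,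
      Function.comp_def]
  have hnodup : D.keys.Nodup := by
    rw [hD]
    exact PySem.Dict.nodup_keys_foldl_modify_key pairs Prod.fst [] _ _ (by simp [PySem.Dict.empty, PySem.Dict.keys])
  have hgetD : ∀ c, D.getD c []
      = (base.filter (fun film => fGet film "genre" == c)).map (fun film => fGet film "titre") := by
    intro c
    rw [hD, PySem.Dict.getD_foldl_modify_append pairs PySem.Dict.empty c]
    simp [hpairs, List.filter_map, Function.comp_def, PySem.Dict.getD, PySem.Dict.get?,
      PySem.Dict.empty, List.map_map]
  rw [PySem.Dict.items_eq_map_keys D hnodup [], hkeys]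
  unfold base_genre_alt
  rw [PySem.List.dedup_eq_ofList]
  exact List.map_congr_left (fun k _ => by rw [hgetD k])

-- ===== VERDICT (by name: the statement is the Claim_ definition above) =====
theorem base_genre_spec : Claim_equal_base_genre := by
  intro base _ _
  exact base_genre_spec_aux base
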